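-- pv_equiv track=rewrite | github.com/ansabgillani/algorithmic-practice | leetcode/2381/solution.py | shiftingLettersII
-- ===== SOURCE A (Python) =====
-- from typing import List
--
-- def shiftingLettersII(s: str, shifts: List[List[int]]) -> str:
--     n = len(s)
--     shift_arr = [0] * (n + 1)
--
--     for start, end, direction in shifts:
--         if direction == 1:
--             shift_arr[start] += 1
--             shift_arr[end + 1] -= 1
--         else:
--             shift_arr[start] -= 1
--             shift_arr[end + 1] += 1
--
--     for i in range(1, n):
--         shift_arr[i] += shift_arr[i - 1]
--
--     result = []
--     for char, shift in zip(s, shift_arr[:-1]):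
--         shifted_char = chr((ord(char) - ord('a') + shift) % 26 + ord('a'))
--         result.append(shifted_char)
--
--     return ''.join(result)
-- ===== SOURCE B (Python) =====
-- def shiftingLettersII(s, shifts):
--     n = len(s)
--     delta = [0] * n
--     for start, end, direction in shifts:
--         step = 1 if direction == 1 else -1
--         for i in range(start, end + 1):
--             delta[i] += step
--     return ''.join(chr((ord(c) - 97 + delta[i]) % 26 + 97) for i, c in enumerate(s))
-- ===== Notes on version B (the rewrite author's own statement) =====
-- stated objective: alternative
-- what changed: B replaces A's difference-array-plus-prefix-sum accumulation with a direct per-range update loop that adds +1/-1 to every position inside each range; Pre_ restricts shift rows to well-formed triples [start,end,direction] with 0 <= start <= end+1 and end < len(s), because outside that A either raises (unpacking/IndexError) or returns difference-array wraparound artefacts on reversed or negative indices (shifting characters outside the given range) that B's direct range loop does not reproduce (B may itself raise there).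
-- outside the precondition, e.g. on shiftingLettersII('abc', [[2, 0, 1]]): A returns 'aac', B returns 'abc'; on shiftingLettersII('abc', [[-1, 2, 1]]): A returns 'abc', B returns 'bce'
import Mathlib
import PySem

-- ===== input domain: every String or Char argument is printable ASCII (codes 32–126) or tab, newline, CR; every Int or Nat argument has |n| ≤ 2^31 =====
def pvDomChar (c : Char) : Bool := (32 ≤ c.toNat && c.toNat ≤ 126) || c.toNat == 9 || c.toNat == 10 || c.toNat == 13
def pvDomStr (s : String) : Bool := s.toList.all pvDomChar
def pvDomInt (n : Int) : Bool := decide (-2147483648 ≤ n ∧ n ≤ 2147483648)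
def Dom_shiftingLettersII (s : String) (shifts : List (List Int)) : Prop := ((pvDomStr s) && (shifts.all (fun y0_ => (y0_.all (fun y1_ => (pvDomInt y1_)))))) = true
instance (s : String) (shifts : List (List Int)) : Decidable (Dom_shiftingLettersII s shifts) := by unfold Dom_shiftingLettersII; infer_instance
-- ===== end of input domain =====

-- B replaces A's difference-array + prefix-sum accumulation with a direct per-range
-- update loop (alternative decomposition; not claimed faster).

-- Python `arr[i] += v` (negative index wraps; out-of-range raises in Python and is
-- excluded by Pre_, modelled here as a no-op).
def pvAddAt (arr : List Int) (i : Int) (v : Int) : List Int :=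
  let j : Int := if i < 0 then i + arr.length else i
  if 0 ≤ j ∧ j < (arr.length : Int) then arr.set j.toNat (arr.getD j.toNat 0 + v) else arr

-- chr((ord(c) - 97 + sh) % 26 + 97), the shifting formula both Pythons share
def pvShiftChar (c : Char) (sh : Int) : Char :=
  Char.ofNat ((((c.toNat : Int) - 97 + sh) % 26 + 97)).toNat

-- ===== PORT A =====
-- loop body of A's `for start, end, direction in shifts` (difference-array marks)
def pvRowA (arr : List Int) (row : List Int) : List Int :=
  match row with
  | [start, e, direction] =>
      if direction = 1 then pvAddAt (pvAddAt arr start 1) (e + 1) (-1)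
      else pvAddAt (pvAddAt arr start (-1)) (e + 1) 1
  | _ => arr

def shiftingLettersII (s : String) (shifts : List (List Int)) : String :=
  let n := s.toList.length
  let shiftArr : List Int := List.replicate (n + 1) 0
  let shiftArr := shifts.foldl pvRowA shiftArr
  let shiftArr := (PySem.List.pyRange 1 (n : Int) 1).foldl
    (fun arr i => pvAddAt arr i (PySem.List.pyGetD arr (i - 1) 0)) shiftArr
  String.ofList ((s.toList.zip (PySem.List.slice shiftArr none (some (-1)))).map
    (fun p => pvShiftChar p.1 p.2))

-- ===== PORT B =====
-- loop body of B's `for start, end, direction in shifts` (direct inner loop over the range)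
def pvRowB (d : List Int) (row : List Int) : List Int :=
  match row with
  | [start, e, direction] =>
      let step : Int := if direction = 1 then 1 else -1
      (PySem.List.pyRange start (e + 1) 1).foldl (fun d i => pvAddAt d i step) d
  | _ => d

def shiftingLettersII_alt (s : String) (shifts : List (List Int)) : String :=
  let n := s.toList.length
  let delta : List Int := shifts.foldl pvRowB (List.replicate n 0)
  String.ofList ((PySem.List.enumerate s.toList).map
    (fun p => pvShiftChar p.2 (PySem.List.pyGetD delta p.1 0)))

-- ===== PRECONDITION & SPEC =====
def pvRowOK (n : Int) (r : List Int) : Bool :=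
  match r with
  | [a, b, _] => decide (0 ≤ a ∧ a ≤ b + 1 ∧ b < n)
  | _ => false

-- Pre_ restricts shift rows to well-formed triples [start,end,direction] with
-- 0 ≤ start ≤ end+1 and end < len(s): outside it A either raises (unpacking error,
-- IndexError past the end) or returns difference-array wraparound artefacts on
-- reversed or negative indices (shifting characters outside the given range) that
-- B's direct range loop does not reproduce (B may itself raise there).
def Pre_shiftingLettersII (s : String) (shifts : List (List Int)) : Prop :=
  ∀ r ∈ shifts, pvRowOK (s.toList.length : Int) r = true
instance (s : String) (shifts : List (List Int)) : Decidable (Pre_shiftingLettersII s shifts) := by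
  unfold Pre_shiftingLettersII; infer_instance

def pvWitness_shiftingLettersII : String × List (List Int) := ("abc", [[0, 1, 1], [1, 2, 0]])

def Spec_shiftingLettersII (s : String) (shifts : List (List Int)) (out : String) : Prop :=
  out = shiftingLettersII_alt s shifts
instance (s : String) (shifts : List (List Int)) (out : String) : Decidable (Spec_shiftingLettersII s shifts out) := by
  unfold Spec_shiftingLettersII; infer_instance

-- ===== CLAIM (what is proved, stated in full; the proofs are below) =====
def Claim_equal_shiftingLettersII : Prop := ∀ (s : String) (shifts : List (List Int)), Dom_shiftingLettersII s shifts → Pre_shiftingLettersII s shifts → Spec_shiftingLettersII s shifts (shiftingLettersII s shifts)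

-- ===== LEMMAS AND PROOFS =====

-- a row is a triple with nonnegative, non-reversed bounds (what the contribution lemmas use)
def pvRowNN (r : List Int) : Prop := ∀ a b c, r = [a, b, c] → 0 ≤ a ∧ a ≤ b + 1

-- per-row contribution of A's first loop to cell k of the difference array
def pvContribA (row : List Int) (k : Nat) : Int :=
  match row with
  | [a, b, c] =>
      (if c = 1 then (1 : Int) else -1) *
        ((if a = (k : Int) then 1 else 0) - (if b + 1 = (k : Int) then 1 else 0))
  | _ => 0

-- per-row contribution of B's loops to cell k of delta
def pvContribB (row : List Int) (k : Nat) : Int :=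
  match row with
  | [a, b, c] => if a ≤ (k : Int) ∧ (k : Int) ≤ b then (if c = 1 then (1 : Int) else -1) else 0
  | _ => 0

-- prefix sum of the first m cells
def pvPsum (arr : List Int) (m : Nat) : Int := ((List.range m).map (fun j => arr.getD j 0)).sum

theorem pvAddAt_length (arr : List Int) (i v : Int) : (pvAddAt arr i v).length = arr.length := by
  unfold pvAddAt; dsimp only; split <;> split <;> simp

theorem pvAddAt_getD (arr : List Int) (i v : Int) (k : Nat) (hi : 0 ≤ i) (hk : k < arr.length) :
    (pvAddAt arr i v).getD k 0 = arr.getD k 0 + (if i = (k : Int) then v else 0) := by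
  unfold pvAddAt
  rw [if_neg (by omega : ¬ i < 0)]
  by_cases hir : 0 ≤ i ∧ i < (arr.length : Int)
  · rw [if_pos hir]
    by_cases hik : i = (k : Int)
    · have : i.toNat = k := by omega
      simp [hik, List.getD, hk]
    · have : i.toNat ≠ k := by omega
      simp [this, hik, List.getD]
  · rw [if_neg hir]
    have : i ≠ (k : Int) := by omega
    simp [this]

theorem pvRowA_length (arr row : List Int) : (pvRowA arr row).length = arr.length := by
  unfold pvRowA
  rcases row with _ | ⟨a, _ | ⟨b, _ | ⟨c, _ | _⟩⟩⟩ <;> simp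
  split <;> simp [pvAddAt_length]

theorem pvRowA_getD (arr row : List Int) (k : Nat) (hk : k < arr.length) (h : pvRowNN row) :
    (pvRowA arr row).getD k 0 = arr.getD k 0 + pvContribA row k := by
  rcases row with _ | ⟨a, _ | ⟨b, _ | ⟨c, _ | ⟨d, t⟩⟩⟩⟩
  all_goals try (simp [pvRowA, pvContribA]; done)
  simp only [pvRowA, pvContribA]
  obtain ⟨ha, hab⟩ := h a b c rfl
  have hb1 : (0:Int) ≤ b + 1 := le_trans ha hab
  split
  · rw [pvAddAt_getD _ _ _ _ hb1 (by simpa [pvAddAt_length] using hk),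
        pvAddAt_getD _ _ _ _ ha hk]
    split_ifs <;> ring
  · rw [pvAddAt_getD _ _ _ _ hb1 (by simpa [pvAddAt_length] using hk),
        pvAddAt_getD _ _ _ _ ha hk]
    split_ifs <;> ring

theorem pvFoldA_length (shifts : List (List Int)) (arr : List Int) :
    (shifts.foldl pvRowA arr).length = arr.length := by
  induction shifts generalizing arr with
  | nil => rfl
  | cons r t ih => simp [List.foldl_cons, ih, pvRowA_length]

theorem pvFoldA_getD (shifts : List (List Int)) (arr : List Int) (k : Nat) (hk : k < arr.length)
    (h : ∀ r ∈ shifts, pvRowNN r) :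
    (shifts.foldl pvRowA arr).getD k 0 = arr.getD k 0 + (shifts.map (fun r => pvContribA r k)).sum := by
  induction shifts generalizing arr with
  | nil => simp
  | cons r t ih =>
    rw [List.foldl_cons, ih _ (by simpa [pvRowA_length] using hk) (fun r hr => h r (by simp [hr])),
        pvRowA_getD _ _ _ hk (h r (by simp))]
    simp; ring

theorem pvFoldAdd_length (L : List Int) (d : List Int) (st : Int) :
    (L.foldl (fun d i => pvAddAt d i st) d).length = d.length := by
  induction L generalizing d with
  | nil => rfl
  | cons i t ih => simp [List.foldl_cons, ih, pvAddAt_length]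

theorem pvFoldAdd_getD (L : List Int) (d : List Int) (st : Int) (k : Nat) (hk : k < d.length)
    (hnn : ∀ i ∈ L, 0 ≤ i) (hnd : L.Nodup) :
    (L.foldl (fun d i => pvAddAt d i st) d).getD k 0
      = d.getD k 0 + (if (k : Int) ∈ L then st else 0) := by
  induction L generalizing d with
  | nil => simp
  | cons i t ih =>
    rw [List.foldl_cons, ih _ (by simpa [pvAddAt_length] using hk)
          (fun x hx => hnn x (by simp [hx])) hnd.of_cons,
        pvAddAt_getD _ _ _ _ (hnn i (by simp)) hk]
    by_cases hik : i = (k : Int)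
    · have hkt : (k : Int) ∉ t := by rw [← hik]; exact (List.nodup_cons.mp hnd).1
      simp [hik, hkt]
    · by_cases hkm : (k : Int) ∈ t <;> simp [hik, hkm, Ne.symm hik]

theorem pvRowB_length (d row : List Int) : (pvRowB d row).length = d.length := by
  rcases row with _ | ⟨a, _ | ⟨b, _ | ⟨c, _ | ⟨x, t⟩⟩⟩⟩ <;> simp [pvRowB, pvFoldAdd_length]

theorem pvRowB_getD (d row : List Int) (k : Nat) (hk : k < d.length) (h : pvRowNN row) :
    (pvRowB d row).getD k 0 = d.getD k 0 + pvContribB row k := by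
  rcases row with _ | ⟨a, _ | ⟨b, _ | ⟨c, _ | ⟨x, t⟩⟩⟩⟩
  all_goals try (simp [pvRowB, pvContribB]; done)
  obtain ⟨ha, hab⟩ := h a b c rfl
  simp only [pvRowB, pvContribB]
  rw [pvFoldAdd_getD _ _ _ _ hk
        (fun i hi => le_trans ha ((PySem.List.mem_pyRange_one).mp hi).1)
        (PySem.List.nodup_pyRange_one _ _)]
  simp only [PySem.List.mem_pyRange_one]
  congr 1
  split_ifs <;> simp_all

theorem pvFoldB_length (shifts : List (List Int)) (d : List Int) :
    (shifts.foldl pvRowB d).length = d.length := by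
  induction shifts generalizing d with
  | nil => rfl
  | cons r t ih => simp [List.foldl_cons, ih, pvRowB_length]

theorem pvFoldB_getD (shifts : List (List Int)) (d : List Int) (k : Nat) (hk : k < d.length)
    (h : ∀ r ∈ shifts, pvRowNN r) :
    (shifts.foldl pvRowB d).getD k 0 = d.getD k 0 + (shifts.map (fun r => pvContribB r k)).sum := by
  induction shifts generalizing d with
  | nil => simp
  | cons r t ih =>
    rw [List.foldl_cons, ih _ (by simpa [pvRowB_length] using hk) (fun r hr => h r (by simp [hr])),
        pvRowB_getD _ _ _ hk (h r (by simp))]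
    simp; ring

theorem pvPref_length (L : List Int) (arr : List Int) :
    (L.foldl (fun a i => pvAddAt a i (PySem.List.pyGetD a (i - 1) 0)) arr).length = arr.length := by
  induction L generalizing arr with
  | nil => rfl
  | cons i t ih => simp [List.foldl_cons, ih, pvAddAt_length]

theorem pvPref_getD (t : Nat) (arr : List Int) (ht : t ≤ arr.length) : ∀ (k : Nat), k < arr.length →
    ((PySem.List.pyRange 1 (t : Int) 1).foldl
        (fun a i => pvAddAt a i (PySem.List.pyGetD a (i - 1) 0)) arr).getD k 0
      = if k < t then pvPsum arr (k + 1) else arr.getD k 0 := by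
  induction t with
  | zero =>
    intro k hk
    rw [PySem.List.pyRange_one_eq_nil (by norm_num)]
    simp
  | succ t ih =>
    intro k hk
    rcases Nat.eq_zero_or_pos t with ht0 | ht1
    · subst ht0
      rw [show ((1:Nat):Int) = 1 by norm_num, PySem.List.pyRange_one_eq_nil (by norm_num)]
      simp only [List.foldl_nil]
      rcases Nat.lt_or_ge k 1 with hk1 | hk1
      · interval_cases k
        simp [pvPsum, List.range_one]
      · rw [if_neg (by omega)]
    · have hcast : ((t:Int) + 1) = (((t+1):Nat) : Int) := by push_cast; ring
      rw [← hcast, PySem.List.pyRange_one_succ_right (by exact_mod_cast ht1), List.foldl_append]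
      simp only [List.foldl_cons, List.foldl_nil]
      set A := (PySem.List.pyRange 1 (t : Int) 1).foldl
        (fun a i => pvAddAt a i (PySem.List.pyGetD a (i - 1) 0)) arr with hA
      have hAlen : A.length = arr.length := pvPref_length _ _
      have hget : PySem.List.pyGetD A ((t:Int) - 1) 0 = pvPsum arr t := by
        have h1 : ((t:Int) - 1) = (((t-1:Nat)) : Int) := by omega
        rw [h1, PySem.List.pyGetD_natCast]
        have := ih (by omega) (t-1) (by omega)
        rw [this, if_pos (by omega)]
        congr 1; omega
      rw [hget, pvAddAt_getD _ _ _ _ (by positivity) (by omega : k < A.length)]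
      by_cases hkt : k = t
      · subst hkt
        rw [ih (by omega) k hk, if_neg (by omega), if_pos (by omega : (k:Int) = (k:Int)),
            if_pos (by omega)]
        simp [pvPsum, List.range_succ]
        ring
      · rw [if_neg (by omega : ¬ (t:Int) = (k:Int)), ih (by omega) k hk, add_zero]
        by_cases hlt : k < t
        · rw [if_pos hlt, if_pos (by omega)]
        · rw [if_neg hlt, if_neg (by omega)]

theorem pvIndSum (x : Int) (m : Nat) :
    ((List.range m).map (fun (j : Nat) => if x = (j : Int) then (1 : Int) else 0)).sum
      = if 0 ≤ x ∧ x < (m : Int) then 1 else 0 := by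
  induction m with
  | zero => simp
  | succ m ih =>
    rw [List.range_succ, List.map_append, List.sum_append, ih]
    simp only [List.map_cons, List.map_nil, List.sum_cons, List.sum_nil]
    split_ifs <;> omega

theorem pvRowSum (row : List Int) (k : Nat) (h : pvRowNN row) :
    ((List.range (k + 1)).map (fun j => pvContribA row j)).sum = pvContribB row k := by
  rcases row with _ | ⟨a, _ | ⟨b, _ | ⟨c, _ | ⟨x, t⟩⟩⟩⟩
  all_goals try (simp [pvContribA, pvContribB]; done)
  obtain ⟨ha, hab⟩ := h a b c rfl
  simp only [pvContribA, pvContribB]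
  have expand : ∀ j : Nat, (if c = 1 then (1:Int) else -1) *
      ((if a = (j : Int) then (1:Int) else 0) - (if b + 1 = (j : Int) then 1 else 0))
      = (if c = 1 then (1:Int) else -1) * (if a = (j : Int) then (1:Int) else 0)
        + (-(if c = 1 then (1:Int) else -1)) * (if b + 1 = (j : Int) then (1:Int) else 0) := by
    intro j; ring
  simp only [expand]
  rw [PySem.List.sum_map_add_int, PySem.List.sum_map_const_mul_int, PySem.List.sum_map_const_mul_int,
      pvIndSum, pvIndSum]
  split_ifs <;> omega

theorem pvSwap (rows : List (List Int)) (m : Nat) :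
    ((List.range m).map (fun j => (rows.map (fun r => pvContribA r j)).sum)).sum
      = (rows.map (fun r => ((List.range m).map (fun j => pvContribA r j)).sum)).sum := by
  induction rows with
  | nil => simp
  | cons r t ih =>
    simp only [List.map_cons, List.sum_cons, ← ih]
    rw [← List.sum_map_add]

theorem pvEnum_length {α : Type} (xs : List α) (st : Int) :
    (PySem.List.enumerate xs st).length = xs.length := by
  induction xs generalizing st with
  | nil => simp [PySem.List.enumerate_nil]
  | cons x t ih => simp [PySem.List.enumerate_cons, ih]

theorem pvEnum_getElem {α : Type} (xs : List α) (st : Int) (k : Nat) (hk : k < xs.length)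
    (hk' : k < (PySem.List.enumerate xs st).length) :
    (PySem.List.enumerate xs st)[k] = (st + k, xs[k]) := by
  induction xs generalizing st k with
  | nil => simp at hk
  | cons x t ih =>
    simp only [PySem.List.enumerate_cons]
    cases k with
    | zero => simp
    | succ k =>
      simp only [List.getElem_cons_succ]
      rw [ih (st + 1) k (by simpa using hk) (by rw [pvEnum_length]; simp at hk; omega)]
      congr 1
      push_cast; ring

-- ===== VERDICT (by name: the statement is the Claim_ definition above) =====
theorem shiftingLettersII_spec : Claim_equal_shiftingLettersII := by
  intro s shifts _ hpre
  unfold Spec_shiftingLettersII shiftingLettersII shiftingLettersII_alt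
  dsimp only
  set n := s.toList.length with hn
  have hNN : ∀ r ∈ shifts, pvRowNN r := by
    intro r hr a b c hre
    have h := hpre r hr
    subst hre
    simp only [pvRowOK, decide_eq_true_eq] at h
    exact ⟨h.1, h.2.1⟩
  set arr1 := shifts.foldl pvRowA (List.replicate (n + 1) 0) with harr1
  set arr2 := (PySem.List.pyRange 1 (n : Int) 1).foldl
    (fun arr i => pvAddAt arr i (PySem.List.pyGetD arr (i - 1) 0)) arr1 with harr2
  set delta := shifts.foldl pvRowB (List.replicate n 0) with hdelta
  have harr1len : arr1.length = n + 1 := by rw [harr1, pvFoldA_length, List.length_replicate]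
  have harr2len : arr2.length = n + 1 := by rw [harr2, pvPref_length, harr1len]
  have hdlen : delta.length = n := by rw [hdelta, pvFoldB_length, List.length_replicate]
  clear_value n arr1 arr2 delta
  rw [PySem.List.slice_to_neg_one]
  congr 1
  apply List.ext_getElem
  · simp [harr2len, hn]
  · intro k h1 h2
    have hkn : k < n := by simpa [harr2len, hn] using h1
    rw [List.getElem_map, List.getElem_map, List.getElem_zip,
        pvEnum_getElem _ _ _ (by omega) (by rw [pvEnum_length]; omega)]
    dsimp only
    congr 1
    -- shift values agree
    have hAval : (arr2.dropLast)[k]'(by simp [harr2len]; omega) =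
        (shifts.map (fun r => pvContribB r k)).sum := by
      rw [List.getElem_dropLast, ← List.getD_eq_getElem arr2 0 (by omega : k < arr2.length)]
      rw [harr2, pvPref_getD n arr1 (by omega) k (by omega), if_pos hkn]
      have hcell : ∀ j : Nat, j < n + 1 → arr1.getD j 0 = (shifts.map (fun r => pvContribA r j)).sum := by
        intro j hj
        rw [harr1, pvFoldA_getD shifts (List.replicate (n+1) 0) j (by simp only [List.length_replicate]; omega) hNN, List.getD_replicate, zero_add]
        omega
      have hmap : (List.range (k+1)).map (fun j => arr1.getD j 0)
          = (List.range (k+1)).map (fun j => (shifts.map (fun r => pvContribA r j)).sum) := by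
        apply List.map_congr_left
        intro j hj
        exact hcell j (by simp at hj; omega)
      rw [pvPsum, hmap, pvSwap]
      apply congrArg
      apply List.map_congr_left
      intro r hr
      exact pvRowSum r k (hNN r hr)
    have hBval : PySem.List.pyGetD delta ((0:Int) + (k:Nat)) 0 = (shifts.map (fun r => pvContribB r k)).sum := by
      rw [zero_add, PySem.List.pyGetD_natCast, hdelta,
          pvFoldB_getD shifts (List.replicate n 0) k (by simp only [List.length_replicate]; omega) hNN,
          List.getD_replicate, zero_add]
      omega
    rw [hAval, hBval]
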